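-- pv_equiv track=rewrite | github.com/Christofosho/advent-of-code | 2021/10.py | part2
-- ===== SOURCE A (Python) =====
-- def part2(L):
--   points = {
--     ")": 1,
--     "]": 2,
--     "}": 3,
--     ">": 4
--   }
--   matches = {
--     "(": ")",
--     "[": "]",
--     "{": "}",
--     "<": ">"
--   }
--   scores = []
--   for i, row in enumerate(L):
--     current = ""
--     completion = ""
--     scores.append(0)
--     for symbol in row[::-1]:
--       opposite = matches.get(symbol, False)
--       if opposite:
--         if len(current) > 0:
--           current = current[:len(current)-1]
--         else:
--           scores[i] = scores[i] * 5 + points[opposite]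
--           completion += opposite
--       else:
--         current += symbol
--   scores.sort()
--   return scores[len(scores)//2 - 1]
-- ===== SOURCE B (Python) =====
-- def part2(L):
--   matches = {"(": ")", "[": "]", "{": "}", "<": ">"}
--   points = {")": 1, "]": 2, "}": 3, ">": 4}
--   scores = []
--   for row in L:
--     stack = []
--     for ch in row:
--       if ch in matches:
--         stack.append(ch)
--       elif stack:
--         stack.pop()
--     score = 0
--     for ch in reversed(stack):
--       score = score * 5 + points[matches[ch]]
--     scores.append(score)
--   scores.sort()
--   return scores[len(scores) // 2 - 1]
-- ===== Notes on version B (the rewrite author's own statement) =====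
-- stated objective: idiomatic
-- what changed: B scans each line forwards with an explicit stack of opening brackets (push openers, pop on any other character) and scores the leftover stack top-first, instead of A's backward scan over row[::-1] that maintains a string of unmatched closing characters and scores openers on underflow.
-- outside the precondition, e.g. on part2([]): A raises IndexError, B raises IndexError
import Mathlib
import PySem

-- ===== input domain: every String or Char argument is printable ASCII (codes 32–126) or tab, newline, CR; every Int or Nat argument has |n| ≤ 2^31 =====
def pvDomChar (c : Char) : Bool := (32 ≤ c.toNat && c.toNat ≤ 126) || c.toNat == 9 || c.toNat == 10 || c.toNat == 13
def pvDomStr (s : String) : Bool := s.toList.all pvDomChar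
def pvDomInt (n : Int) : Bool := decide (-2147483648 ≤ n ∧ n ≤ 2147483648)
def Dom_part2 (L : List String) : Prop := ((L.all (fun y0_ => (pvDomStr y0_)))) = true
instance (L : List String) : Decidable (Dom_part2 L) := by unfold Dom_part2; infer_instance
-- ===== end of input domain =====

-- B re-implements the row scan forwards with an explicit stack of openers (scored top-first)
-- instead of A's backward scan with an unmatched-closer string; objective: idiomatic, same cost.
-- ===== PORT A =====
-- shared literal dicts of A's source (also read by B)
def pvPoints : PySem.Dict Char Int := PySem.Dict.ofList [(')', 1), (']', 2), ('}', 3), ('>', 4)]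
def pvMatches : PySem.Dict Char Char := PySem.Dict.ofList [('(', ')'), ('[', ']'), ('{', '}'), ('<', '>')]

-- A's inner loop body; state = (current, completion, scores[i]) — `scores.append(0)` then in-place
-- updates of `scores[i]` are tracked as the third component (exact: only index i is ever written).
def pvRowStepA (st : List Char × List Char × Int) (symbol : Char) : List Char × List Char × Int :=
  match PySem.Dict.get? pvMatches symbol with   -- opposite = matches.get(symbol, False); some ↔ truthy
  | some opposite =>
      if st.1.length > 0 then
        (st.1.dropLast, st.2.1, st.2.2)         -- current = current[:len(current)-1]
      else
        (st.1, st.2.1 ++ [opposite], st.2.2 * 5 + PySem.Dict.getD pvPoints opposite 0)  -- points[opposite]: key always present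
  | none => (st.1 ++ [symbol], st.2.1, st.2.2)  -- current += symbol

def pvRowA (row : String) : List Char × List Char × Int :=
  (row.toList.reverse).foldl pvRowStepA ([], [], 0)   -- for symbol in row[::-1]

def part2 (L : List String) : Int :=
  let scores : List Int := L.foldl (fun scores row => scores ++ [(pvRowA row).2.2]) []
  let ss := PySem.List.sorted scores (fun x => x) false   -- scores.sort()
  match PySem.List.pyGet? ss (PySem.Int.floordiv (ss.length : Int) 2 - 1) with
  | some v => v
  | none => 0   -- scores[len(scores)//2 - 1] raises IndexError only for L = [], excluded by Pre_

-- ===== PORT B =====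
def pvStepB (stack : List Char) (ch : Char) : List Char :=
  if PySem.Dict.contains pvMatches ch then stack ++ [ch]   -- if ch in matches: stack.append(ch)
  else if stack ≠ [] then stack.dropLast else stack        -- elif stack: stack.pop()

def pvStackB (row : String) : List Char := row.toList.foldl pvStepB []

def pvScoreB (stack : List Char) : Int :=                  -- for ch in reversed(stack): …
  stack.reverse.foldl (fun sc ch => sc * 5 + PySem.Dict.getD pvPoints (PySem.Dict.getD pvMatches ch ' ') 0) 0

def part2_alt (L : List String) : Int :=
  let scores : List Int := L.foldl (fun scores row => scores ++ [pvScoreB (pvStackB row)]) []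
  let ss := PySem.List.sorted scores (fun x => x) false
  match PySem.List.pyGet? ss (PySem.Int.floordiv (ss.length : Int) 2 - 1) with
  | some v => v
  | none => 0

-- ===== PRECONDITION & SPEC =====
-- Pre_ excludes only L = [], on which the Python A raises IndexError (scores[-1] on an empty list).
def Pre_part2 (L : List String) : Prop := L ≠ []
instance (L : List String) : Decidable (Pre_part2 L) := by unfold Pre_part2; infer_instance
def pvWitness_part2 : List String := ["<([{", "ab)x"]

def Spec_part2 (L : List String) (out : Int) : Prop := out = part2_alt L
instance (L : List String) (out : Int) : Decidable (Spec_part2 L out) := by unfold Spec_part2; infer_instance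

-- ===== CLAIM (what is proved, stated in full; the proofs are below) =====
def Claim_equal_part2 : Prop := ∀ (L : List String), Dom_part2 L → Pre_part2 L → Spec_part2 L (part2 L)

-- ===== LEMMAS AND PROOFS =====
-- proof-only helpers: underflow count and leftover-opener stack of B's forward scan, head-recursively
def pvIsOpen (c : Char) : Bool := PySem.Dict.contains pvMatches c

def pvE : List Char → Nat
  | [] => 0
  | c :: t => if pvIsOpen c then pvE t - 1 else pvE t + 1

def pvS : List Char → List Char
  | [] => []
  | c :: t => if pvIsOpen c && (pvE t == 0) then c :: pvS t else pvS t

lemma pvStepB_foldl (l : List Char) (i : List Char) :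
    l.foldl pvStepB i = i.take (i.length - pvE l) ++ pvS l := by
  induction l generalizing i with
  | nil => simp [pvE, pvS]
  | cons c t ih =>
    simp only [List.foldl_cons, pvStepB, pvE, pvS]
    cases hop : pvIsOpen c with
    | true =>
      simp only [pvIsOpen] at hop
      rw [if_pos hop, ih]
      cases h0 : pvE t with
      | zero =>
        rw [List.take_of_length_le (by simp)]
        simp
      | succ k =>
        have hEb : ((k + 1 : Nat) == 0) = false := by simp
        rw [List.take_append_of_le_length
          (by simp only [List.length_append, List.length_cons, List.length_nil]; omega)]
        have heq : (i ++ [c]).length - (k + 1) = i.length - (k + 1 - 1) := by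
          simp only [List.length_append, List.length_cons, List.length_nil]; omega
        rw [heq]
        simp [hEb]
    | false =>
      simp only [pvIsOpen] at hop
      rw [if_neg (by simp [hop])]
      have hd : (if i ≠ [] then i.dropLast else i) = i.dropLast := by
        by_cases h : i = [] <;> simp [h]
      rw [hd, ih]
      have : i.dropLast.take (i.dropLast.length - pvE t) = i.take (i.length - (pvE t + 1)) := by
        rw [List.dropLast_eq_take, List.length_take, List.take_take]
        congr 1
        omega
      rw [this]
      simp

lemma pvStackB_eq (row : String) : pvStackB row = pvS row.toList := by
  simp [pvStackB, pvStepB_foldl]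

lemma pvScoreB_cons (c : Char) (s : List Char) :
    pvScoreB (c :: s) = pvScoreB s * 5 + PySem.Dict.getD pvPoints (PySem.Dict.getD pvMatches c ' ') 0 := by
  simp [pvScoreB, List.foldl_append]

lemma pvRowA_inv (l : List Char) :
    (l.reverse.foldl pvRowStepA ([], [], 0)).1.length = pvE l ∧
    (l.reverse.foldl pvRowStepA ([], [], 0)).2.2 = pvScoreB (pvS l) := by
  induction l with
  | nil => simp [pvE, pvS, pvScoreB]
  | cons c t ih =>
    rw [List.reverse_cons, List.foldl_append, List.foldl_cons, List.foldl_nil]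
    obtain ⟨ih1, ih2⟩ := ih
    generalize hst : List.foldl pvRowStepA ([], [], 0) t.reverse = st at ih1 ih2 ⊢
    obtain ⟨cur, comp, sc⟩ := st
    simp only at ih1 ih2
    cases hg : PySem.Dict.get? pvMatches c with
    | none =>
      have hop : pvIsOpen c = false := by
        simp [pvIsOpen, PySem.Dict.contains_eq_isSome_get?, hg]
      simp only [pvRowStepA, hg, pvE, pvS, hop]
      constructor
      · simp [ih1]
      · simpa using ih2
    | some opp =>
      have hop : pvIsOpen c = true := by
        simp [pvIsOpen, PySem.Dict.contains_eq_isSome_get?, hg]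
      simp only [pvRowStepA, hg, pvE, pvS, hop]
      by_cases hlen : cur.length > 0
      · rw [if_pos hlen]
        have hE : pvE t ≠ 0 := by omega
        have hEb : (pvE t == 0) = false := by simp [hE]
        constructor
        · simp [List.length_dropLast, ih1]
        · simp only [hEb, Bool.and_false, if_neg (Bool.false_ne_true)]
          exact ih2
      · rw [if_neg hlen]
        have hE : pvE t = 0 := by omega
        constructor
        · simp [ih1, hE]
        · have hEb : (pvE t == 0) = true := by simp [hE]
          simp only [hEb, Bool.true_and, if_true]
          have hgd : pvMatches.getD c ' ' = opp := by
            rw [PySem.Dict.getD_eq_get?_getD, hg]; rfl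
          rw [pvScoreB_cons, hgd, ih2]

lemma pvRow_score_eq (row : String) : (pvRowA row).2.2 = pvScoreB (pvStackB row) := by
  rw [pvStackB_eq]
  exact (pvRowA_inv row.toList).2

-- ===== VERDICT (by name: the statement is the Claim_ definition above) =====
theorem part2_spec : Claim_equal_part2 := by
  intro L _ _
  unfold Spec_part2 part2 part2_alt
  have : (fun (scores : List Int) (row : String) => scores ++ [(pvRowA row).2.2])
       = (fun (scores : List Int) (row : String) => scores ++ [pvScoreB (pvStackB row)]) := by
    funext s r; rw [pvRow_score_eq]
  rw [this]
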